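-- pv_equiv track=rewrite | github.com/FedericoDeniard/Programaci-n-I | trabajos_practicos/cadenas/CSI.py | find_killer
-- ===== SOURCE A (Python) =====
-- def find_killer(dna: str, data_base: list):
--     killer = "No hay ningún asesino"
--     search_length = len(dna)
--     for i in range(len(data_base)):
--         suspect_dna = data_base[i][1]
--         for j in range(len(suspect_dna)):
--             if suspect_dna[j:j+search_length] == dna:
--                 killer = f"La persona culpable es: {data_base[i][0]}"
--                 break
--     return killer
-- ===== SOURCE B (Python) =====
-- def find_killer(dna: str, data_base: list):
--     for name, suspect_dna in reversed(data_base):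
--         if dna in suspect_dna:
--             return f"La persona culpable es: {name}"
--     return "No hay ningún asesino"
-- ===== Notes on version B (the rewrite author's own statement) =====
-- stated objective: faster
-- what changed: B scans the database backwards and returns the first suspect whose DNA contains dna using Python's linear substring test, instead of A's forward pass that tests every slice position of every suspect and overwrites the answer
-- outside the precondition, e.g. on find_killer('', [('x', '')]): A returns 'No hay ningún asesino', B returns 'La persona culpable es: x'
import Mathlib
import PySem

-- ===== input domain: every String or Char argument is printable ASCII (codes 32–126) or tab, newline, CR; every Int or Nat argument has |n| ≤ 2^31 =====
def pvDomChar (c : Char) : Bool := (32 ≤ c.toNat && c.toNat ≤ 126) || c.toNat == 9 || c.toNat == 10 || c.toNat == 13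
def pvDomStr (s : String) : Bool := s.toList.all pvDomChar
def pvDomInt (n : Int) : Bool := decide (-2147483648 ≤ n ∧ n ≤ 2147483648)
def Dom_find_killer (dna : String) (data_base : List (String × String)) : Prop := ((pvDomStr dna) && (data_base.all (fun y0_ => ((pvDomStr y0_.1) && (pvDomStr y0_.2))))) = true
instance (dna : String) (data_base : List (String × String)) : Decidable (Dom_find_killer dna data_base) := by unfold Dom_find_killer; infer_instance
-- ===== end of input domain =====

-- B replaces A's per-position slice comparison over every suspect with a backward scan using one
-- linear substring test per suspect that stops at the first (= last overall) match; objective: faster.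


-- ===== PORT A =====
-- inner 'for j in range(len(suspect_dna)): if suspect_dna[j:j+search_length] == dna: killer = …; break'
def pvLoopJ (dna sdna name : String) (js : List Int) (killer : String) : String :=
  match js with
  | [] => killer
  | j :: rest =>
      if PySem.Str.slice sdna (some j) (some (j + PySem.Str.len dna)) = dna then
        "La persona culpable es: " ++ name
      else pvLoopJ dna sdna name rest killer

def find_killer (dna : String) (data_base : List (String × String)) : String :=
  data_base.foldl
    (fun killer p =>
      pvLoopJ dna p.2 p.1 (PySem.List.pyRange 0 (PySem.Str.len p.2) 1) killer)
    "No hay ningún asesino"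

-- ===== PORT B =====
-- 'for name, suspect_dna in reversed(data_base): if dna in suspect_dna: return …'
def pvScan (dna : String) (rev : List (String × String)) : String :=
  match rev with
  | [] => "No hay ningún asesino"
  | (name, sdna) :: rest =>
      if PySem.Str.isIn dna sdna then "La persona culpable es: " ++ name
      else pvScan dna rest

def find_killer_alt (dna : String) (data_base : List (String × String)) : String :=
  pvScan dna data_base.reverse

-- ===== PRECONDITION & SPEC =====
-- Pre_ excludes only the degenerate corner dna = "" with some suspect whose DNA is also "": there A's
-- position loop never runs on that suspect so it cannot match, while Python's '' in '' is True; neither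
-- answer is specified for an empty pattern against an empty text, so that tie is carved out.
def Pre_find_killer (dna : String) (data_base : List (String × String)) : Prop :=
  ¬ (dna = "" ∧ ∃ p ∈ data_base, p.2 = "")
instance (dna : String) (data_base : List (String × String)) : Decidable (Pre_find_killer dna data_base) := by
  unfold Pre_find_killer; infer_instance

def pvWitness_find_killer : String × (List (String × String)) := ("ab", [("x", "zab"), ("y", "ka")])

def Spec_find_killer (dna : String) (data_base : List (String × String)) (out : String) : Prop := out = find_killer_alt dna data_base
instance (dna : String) (data_base : List (String × String)) (out : String) : Decidable (Spec_find_killer dna data_base out) := by unfold Spec_find_killer; infer_instance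

-- ===== CLAIM (what is proved, stated in full; the proofs are below) =====
def Claim_equal_find_killer : Prop := ∀ (dna : String) (data_base : List (String × String)), Dom_find_killer dna data_base → Pre_find_killer dna data_base → Spec_find_killer dna data_base (find_killer dna data_base)

-- ===== LEMMAS AND PROOFS =====

-- A's inner loop returns the match string iff some slice position matches (all matches produce the same string).
theorem pvLoopJ_eq (dna sdna name killer : String) (js : List Int) :
    pvLoopJ dna sdna name js killer =
      if ∃ j ∈ js, PySem.Str.slice sdna (some j) (some (j + PySem.Str.len dna)) = dna
      then "La persona culpable es: " ++ name else killer := by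
  induction js with
  | nil => simp [pvLoopJ]
  | cons j rest ih =>
      by_cases h : PySem.Str.slice sdna (some j) (some (j + PySem.Str.len dna)) = dna
      · show (if _ then _ else _) = _
        rw [if_pos h, if_pos ⟨j, List.mem_cons_self, h⟩]
      · show (if _ then _ else _) = _
        rw [if_neg h, ih]
        refine if_congr ?_ rfl rfl
        constructor
        · rintro ⟨x, hx, hs⟩; exact ⟨x, List.mem_cons_of_mem _ hx, hs⟩
        · rintro ⟨x, hx, hs⟩
          rcases List.mem_cons.mp hx with rfl | hx'
          · exact absurd hs h
          · exact ⟨x, hx', hs⟩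

-- the slice test at a natural position is "dna's list is the length-L take of the drop"
theorem slice_test_eq (dna sdna : String) (k : Nat) :
    (PySem.Str.slice sdna (some (k : Int)) (some ((k : Int) + PySem.Str.len dna)) = dna) ↔
      (sdna.toList.drop k).take dna.toList.length = dna.toList := by
  rw [← String.toList_inj, PySem.Str.toList_slice, PySem.Chars.slice_eq_listSlice,
    PySem.Str.len_eq, PySem.List.slice_natCast_add]

-- A's per-suspect test agrees with Python's substring test except when dna = "" and sdna = ""
theorem exists_slice_iff_isIn (dna sdna : String) (h : ¬ (dna = "" ∧ sdna = "")) :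
    (∃ j ∈ PySem.List.pyRange 0 (PySem.Str.len sdna) 1,
        PySem.Str.slice sdna (some j) (some (j + PySem.Str.len dna)) = dna) ↔
      PySem.Str.isIn dna sdna = true := by
  rw [PySem.Str.isIn_eq]
  constructor
  · rintro ⟨j, hj, hs⟩
    rw [PySem.List.mem_pyRange_one, PySem.Str.len_eq] at hj
    obtain ⟨k, rfl⟩ : ∃ k : Nat, j = (k : Int) := ⟨j.toNat, (Int.toNat_of_nonneg hj.1).symm⟩
    rw [slice_test_eq] at hs
    rw [PySem.Chars.isIn_iff_infix]
    have hpre : dna.toList <+: sdna.toList.drop k := by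
      rw [← hs]; exact List.take_prefix _ _
    exact hpre.isInfix.trans (sdna.toList.drop_suffix k).isInfix
  · intro hin
    by_cases hdna : dna.toList = []
    · have hs : sdna.toList ≠ [] := by
        intro hs
        exact h ⟨String.toList_inj.mp (by simp [hdna]), String.toList_inj.mp (by simp [hs])⟩
      refine ⟨0, ?_, ?_⟩
      · rw [PySem.List.mem_pyRange_one, PySem.Str.len_eq]
        constructor
        · omega
        · exact_mod_cast List.length_pos_iff.mpr hs
      · rw [(by norm_num : (0 : Int) = ((0 : Nat) : Int)), slice_test_eq, hdna]
        simp
    · obtain ⟨k, hk⟩ := (PySem.Chars.exists_prefix_drop_iff_isIn dna.toList sdna.toList).mpr hin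
      refine ⟨(k : Int), ?_, ?_⟩
      · rw [PySem.List.mem_pyRange_one, PySem.Str.len_eq]
        have hne : sdna.toList.drop k ≠ [] := by
          intro hnil; rw [hnil] at hk
          exact hdna (List.prefix_nil.mp hk)
        have : k < sdna.toList.length := by
          by_contra hge
          exact hne (List.drop_eq_nil_iff.mpr (by omega))
        constructor
        · omega
        · exact_mod_cast this
      · rw [slice_test_eq]
        exact (List.prefix_iff_eq_take.mp hk).symm

-- B's scan with an arbitrary fallback value
def pvScanK (dna : String) (rev : List (String × String)) (k : String) : String :=
  match rev with
  | [] => k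
  | (name, sdna) :: rest =>
      if PySem.Str.isIn dna sdna then "La persona culpable es: " ++ name
      else pvScanK dna rest k

theorem pvScan_eq_pvScanK (dna : String) (rev : List (String × String)) :
    pvScan dna rev = pvScanK dna rev "No hay ningún asesino" := by
  induction rev with
  | nil => rfl
  | cons p rest ih => cases p with | mk n s => simp [pvScan, pvScanK, ih]

theorem pvScanK_append_singleton (dna : String) (l : List (String × String))
    (p : String × String) (k : String) :
    pvScanK dna (l ++ [p]) k =
      pvScanK dna l (if PySem.Str.isIn dna p.2 then "La persona culpable es: " ++ p.1 else k) := by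
  induction l with
  | nil => cases p; simp [pvScanK]
  | cons q rest ih => cases q with | mk n s => simp [pvScanK, ih]

theorem fold_eq_scanK (dna : String) (db : List (String × String)) :
    ∀ killer : String, (∀ p ∈ db, ¬ (dna = "" ∧ p.2 = "")) →
      db.foldl
        (fun killer p =>
          pvLoopJ dna p.2 p.1 (PySem.List.pyRange 0 (PySem.Str.len p.2) 1) killer)
        killer = pvScanK dna db.reverse killer := by
  induction db with
  | nil => intro killer _; rfl
  | cons p rest ih =>
      intro killer h
      have hp : ¬ (dna = "" ∧ p.2 = "") := h p (List.mem_cons_self)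
      have hstep :
          pvLoopJ dna p.2 p.1 (PySem.List.pyRange 0 (PySem.Str.len p.2) 1) killer =
            if PySem.Str.isIn dna p.2 then "La persona culpable es: " ++ p.1 else killer := by
        rw [pvLoopJ_eq]
        by_cases hin : PySem.Str.isIn dna p.2 = true
        · rw [if_pos ((exists_slice_iff_isIn dna p.2 hp).mpr hin), if_pos hin]
        · rw [if_neg (fun hex => hin ((exists_slice_iff_isIn dna p.2 hp).mp hex)),
            if_neg hin]
      simp only [List.foldl_cons, List.reverse_cons, hstep]
      rw [ih _ (fun q hq => h q (List.mem_cons_of_mem _ hq)), pvScanK_append_singleton]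

-- ===== VERDICT (by name: the statement is the Claim_ definition above) =====
theorem find_killer_spec : Claim_equal_find_killer := by
  intro dna db _ hpre
  unfold Spec_find_killer find_killer find_killer_alt Pre_find_killer at *
  rw [pvScan_eq_pvScanK]
  exact fold_eq_scanK dna db _ (fun p hp hcontra => hpre ⟨hcontra.1, p, hp, hcontra.2⟩)
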